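-- pv_equiv track=rewrite | github.com/praisel-ekpenyong/SOC-Analyst-Lab | ats_scanner/extractors/section_extractor.py | _find_skills_blocks
-- ===== SOURCE A (Python) =====
-- from typing import List, Tuple
--
-- def _find_skills_blocks(text: str) -> List[Tuple[int, int, str]]:
--     """Find skills blocks by looking for lists of comma-separated items."""
--     blocks = []
--
--     # Look for lines with many commas (likely skill lists)
--     lines = text.split('\n')
--     char_pos = 0
--
--     for line in lines:
--         line_stripped = line.strip()
--         # If line has 3+ commas and is not too long, likely a skill list
--         if line_stripped.count(',') >= 3 and len(line_stripped) < 300: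
--             blocks.append((char_pos, char_pos + len(line), line_stripped))
--         char_pos += len(line) + 1
--
--     return blocks
-- ===== SOURCE B (Python) =====
-- from typing import List, Tuple
--
-- def _find_skills_blocks(text: str) -> List[Tuple[int, int, str]]:
--     """Find skills blocks by looking for lists of comma-separated items.
--
--     Streaming scanner: one pass over the raw characters with a line buffer;
--     lines are never materialised by split('\n') — each line is assembled,
--     judged and flushed as the newline (or the end of text) is reached.
--     """
--     blocks: List[Tuple[int, int, str]] = []
--     line_start = 0
--     pos = 0
--     cur: List[str] = []
--
--     def flush() -> None:
--         line = ''.join(cur)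
--         s = line.strip()
--         if s.count(',') >= 3 and len(s) < 300:
--             blocks.append((line_start, line_start + len(line), s))
--
--     for ch in text:
--         if ch == '\n':
--             flush()
--             cur = []
--             line_start = pos + 1
--         else:
--             cur.append(ch)
--         pos += 1
--     flush()
--     return blocks
-- ===== Notes on version B (the rewrite author's own statement) =====
-- stated objective: alternative
-- what changed: Replaces A's split-into-lines-then-loop-with-char_pos design with a streaming character scanner: one pass over the raw characters maintaining a line buffer and flushing each assembled line at a newline or at end of text, so the line list is never materialised.
import Mathlib
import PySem

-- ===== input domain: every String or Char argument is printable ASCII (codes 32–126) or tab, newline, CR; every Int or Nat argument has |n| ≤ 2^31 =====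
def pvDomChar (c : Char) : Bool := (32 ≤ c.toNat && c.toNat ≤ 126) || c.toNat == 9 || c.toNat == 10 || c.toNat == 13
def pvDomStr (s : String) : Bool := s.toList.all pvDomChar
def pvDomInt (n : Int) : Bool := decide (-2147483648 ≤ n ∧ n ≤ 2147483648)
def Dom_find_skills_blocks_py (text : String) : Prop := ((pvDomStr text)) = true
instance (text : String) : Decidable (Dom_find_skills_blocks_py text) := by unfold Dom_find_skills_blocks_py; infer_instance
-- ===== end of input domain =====

-- B replaces A's split-into-lines-then-loop design with a streaming character scanner
-- (one pass over the raw characters with a line buffer, flushed at each newline); objective: alternative.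


-- ===== PORT A =====
def find_skills_blocks_py (text : String) : List (Int × Int × String) :=
  let lines := (PySem.Str.split? text "\n").getD []
  (lines.foldl
    (fun (st : List (Int × Int × String) × Int) line =>
      let stripped := PySem.Str.strip line
      let blocks :=
        if 3 ≤ PySem.Str.count stripped "," ∧ PySem.Str.len stripped < 300 then
          st.1 ++ [(st.2, st.2 + PySem.Str.len line, stripped)]
        else st.1
      (blocks, st.2 + PySem.Str.len line + 1))
    ([], 0)).1

-- ===== PORT B =====
-- Source B's `flush`: join the buffer into the line (''.join of single chars IS the char list), strip, test, append.
def pvFlushB (bs : List (Int × Int × String)) (ls : Int) (cur : List Char) : List (Int × Int × String) :=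
  let line := String.ofList cur
  let s := PySem.Str.strip line
  if 3 ≤ PySem.Str.count s "," ∧ PySem.Str.len s < 300 then
    bs ++ [(ls, ls + PySem.Str.len line, s)]
  else bs

def find_skills_blocks_py_alt (text : String) : List (Int × Int × String) :=
  -- state: (blocks, line_start, cur, pos), exactly Source B's loop over the characters of text
  let st := text.toList.foldl
    (fun (st : List (Int × Int × String) × Int × List Char × Int) ch =>
      if ch = '\n' then (pvFlushB st.1 st.2.1 st.2.2.1, st.2.2.2 + 1, [], st.2.2.2 + 1)
      else (st.1, st.2.1, st.2.2.1 ++ [ch], st.2.2.2 + 1))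
    ([], 0, [], 0)
  pvFlushB st.1 st.2.1 st.2.2.1

-- ===== PRECONDITION & SPEC =====
def Spec_find_skills_blocks_py (text : String) (out : List (Int × Int × String)) : Prop := out = find_skills_blocks_py_alt text
instance (text : String) (out : List (Int × Int × String)) : Decidable (Spec_find_skills_blocks_py text out) := by unfold Spec_find_skills_blocks_py; infer_instance

-- ===== CLAIM (what is proved, stated in full; the proofs are below) =====
def Claim_equal_find_skills_blocks_py : Prop := ∀ (text : String), Dom_find_skills_blocks_py text → Spec_find_skills_blocks_py text (find_skills_blocks_py text)

-- ===== LEMMAS AND PROOFS =====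

/-- Reference: blocks of a line list starting at character position `pos`. -/
def pvG (pos : Int) : List String → List (Int × Int × String)
  | [] => []
  | ln :: rest =>
    (if 3 ≤ PySem.Str.count (PySem.Str.strip ln) "," ∧ PySem.Str.len (PySem.Str.strip ln) < 300 then
        [(pos, pos + PySem.Str.len ln, PySem.Str.strip ln)]
      else [])
      ++ pvG (pos + PySem.Str.len ln + 1) rest

/-- Prepend `x` onto the first piece. -/
def pvConsHead (x : List Char) : List (List Char) → List (List Char)
  | [] => [x]
  | h :: t => (x ++ h) :: t

/-- Structural splitter on '\n'. -/
def pvSplitNl : List Char → List (List Char)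
  | [] => [[]]
  | c :: r => if c = '\n' then [] :: pvSplitNl r else pvConsHead [c] (pvSplitNl r)

theorem pvSplitNl_ne_nil (l : List Char) : pvSplitNl l ≠ [] := by
  cases l with
  | nil => simp [pvSplitNl]
  | cons c r =>
    simp only [pvSplitNl]
    split_ifs
    · simp
    · cases h : pvSplitNl r <;> simp [pvConsHead]

theorem pvConsHead_consHead (a b : List Char) (X : List (List Char)) :
    pvConsHead a (pvConsHead b X) = pvConsHead (a ++ b) X := by
  cases X <;> simp [pvConsHead]

theorem pvSplitOn_go (l : List Char) (fuel : Nat) (cur : List Char) (acc : List (List Char))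
    (hf : l.length ≤ fuel) :
    PySem.Chars.splitOn.go ['\n'] fuel l cur acc
      = acc.reverse ++ pvConsHead cur.reverse (pvSplitNl l) := by
  induction l generalizing fuel cur acc with
  | nil =>
    cases fuel <;> simp [PySem.Chars.splitOn.go, pvSplitNl, pvConsHead]
  | cons c r ih =>
    cases fuel with
    | zero => simp at hf
    | succ f =>
      by_cases hc : c = '\n'
      · subst hc
        rw [show PySem.Chars.splitOn.go ['\n'] (f+1) ('\n' :: r) cur acc
              = PySem.Chars.splitOn.go ['\n'] f r [] (cur.reverse :: acc) by
            simp [PySem.Chars.splitOn.go, List.isPrefixOf]]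
        rw [ih f [] (cur.reverse :: acc) (by simpa using hf)]
        obtain ⟨h, t, hht⟩ : ∃ h t, pvSplitNl r = h :: t := by
          cases hsp : pvSplitNl r with
          | nil => exact absurd hsp (pvSplitNl_ne_nil r)
          | cons h t => exact ⟨h, t, rfl⟩
        simp [pvSplitNl, hht, pvConsHead]
      · rw [show PySem.Chars.splitOn.go ['\n'] (f+1) (c :: r) cur acc
              = PySem.Chars.splitOn.go ['\n'] f r (c :: cur) acc by
            simp only [PySem.Chars.splitOn.go, List.isPrefixOf, Bool.and_eq_true, beq_iff_eq]
            rw [if_neg (by simp [hc, eq_comm])]]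
        rw [ih f (c :: cur) acc (by simpa using hf)]
        simp [pvSplitNl, hc, ← pvConsHead_consHead]

theorem pvSplitOn_eq (l : List Char) :
    PySem.Chars.splitOn l ['\n'] = pvSplitNl l := by
  rw [PySem.Chars.splitOn, pvSplitOn_go l (l.length + 1) [] [] (by omega)]
  obtain ⟨h, t, hht⟩ : ∃ h t, pvSplitNl l = h :: t := by
    cases hsp : pvSplitNl l with
    | nil => exact absurd hsp (pvSplitNl_ne_nil l)
    | cons h t => exact ⟨h, t, rfl⟩
  simp [hht, pvConsHead]

theorem pvA_loop (lines : List String) (acc : List (Int × Int × String)) (pos : Int) :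
    (lines.foldl
      (fun (st : List (Int × Int × String) × Int) line =>
        let stripped := PySem.Str.strip line
        let blocks :=
          if 3 ≤ PySem.Str.count stripped "," ∧ PySem.Str.len stripped < 300 then
            st.1 ++ [(st.2, st.2 + PySem.Str.len line, stripped)]
          else st.1
        (blocks, st.2 + PySem.Str.len line + 1))
      (acc, pos)).1 = acc ++ pvG pos lines := by
  induction lines generalizing acc pos with
  | nil => simp [pvG]
  | cons ln rest ih =>
    simp only [List.foldl_cons, pvG]
    rw [ih]
    split_ifs <;> simp

theorem pvB_loop (l : List Char) (bs : List (Int × Int × String)) (ls : Int) (cur : List Char)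
    (pos : Int) (hpos : pos = ls + cur.length) :
    (let st := l.foldl
        (fun (st : List (Int × Int × String) × Int × List Char × Int) ch =>
          if ch = '\n' then (pvFlushB st.1 st.2.1 st.2.2.1, st.2.2.2 + 1, [], st.2.2.2 + 1)
          else (st.1, st.2.1, st.2.2.1 ++ [ch], st.2.2.2 + 1))
        (bs, ls, cur, pos)
     pvFlushB st.1 st.2.1 st.2.2.1)
      = bs ++ pvG ls ((pvConsHead cur (pvSplitNl l)).map String.ofList) := by
  induction l generalizing bs ls cur pos with
  | nil =>
    simp only [List.foldl_nil, pvSplitNl, pvConsHead, List.map, pvFlushB, pvG,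
      List.append_nil]
    split_ifs <;> simp
  | cons c r ih =>
    by_cases hc : c = '\n'
    · subst hc
      simp only [List.foldl_cons, reduceIte]
      rw [ih (pvFlushB bs ls cur) (pos + 1) [] (pos + 1) (by simp)]
      obtain ⟨h, t, hht⟩ : ∃ h t, pvSplitNl r = h :: t := by
        cases hsp : pvSplitNl r with
        | nil => exact absurd hsp (pvSplitNl_ne_nil r)
        | cons h t => exact ⟨h, t, rfl⟩
      simp only [pvSplitNl, reduceIte, hht, pvConsHead, List.map, pvG, pvFlushB,
        List.nil_append, List.append_nil]
      have hls : ls + PySem.Str.len (String.ofList cur) + 1 = pos + 1 := by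
        simp [PySem.Str.len_eq, hpos]
      rw [hls]
      split_ifs <;> simp
    · simp only [List.foldl_cons, if_neg hc]
      rw [ih bs ls (cur ++ [c]) (pos + 1) (by simp [hpos]; omega)]
      simp [pvSplitNl, hc, ← pvConsHead_consHead]

-- ===== VERDICT (by name: the statement is the Claim_ definition above) =====
theorem find_skills_blocks_py_spec : Claim_equal_find_skills_blocks_py := by
  intro text _
  unfold Spec_find_skills_blocks_py
  simp only [find_skills_blocks_py, find_skills_blocks_py_alt]
  rw [pvA_loop, pvB_loop _ _ _ _ _ (by simp)]
  obtain ⟨h, t, hht⟩ : ∃ h t, pvSplitNl text.toList = h :: t := by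
    cases hsp : pvSplitNl text.toList with
    | nil => exact absurd hsp (pvSplitNl_ne_nil _)
    | cons h t => exact ⟨h, t, rfl⟩
  simp [PySem.Str.split?, PySem.Chars.split?, pvSplitOn_eq, hht, pvConsHead]
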